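-- pv_equiv track=rewrite | github.com/antmicro/cocotb-tilelink | tests/test_tl/ULSingleMasterDriver/test_TLUL_Master.py | split_write_to_bus_width
-- ===== SOURCE A (Python) =====
-- from typing import Tuple, Dict, List, Iterator
--
-- def split_write_to_bus_width(values: Dict[int, List[Tuple[List[int], List[bool]]]], bus_width: int) \
--         -> Dict[int, List[Tuple[List[int], List[bool]]]]:
--     ret: Dict[int, List[Tuple[List[int], List[bool]]]] = {}
--
--     for address, _sequances in values.items():
--         for _write_values, _mask in _sequances:
--             base_address = (address//bus_width)*bus_width
--             offset = 0
--             while base_address < address + len(_mask):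
--                 if base_address not in ret:
--                     ret[base_address] = []
--                 temp_write_values: List[int] = []
--                 temp_write_mask: List[bool] = []
--                 for i in range(bus_width):
--                     if base_address + i in range(address, address + len(_mask)):
--                         temp_write_values.append(_write_values[offset])
--                         temp_write_mask.append(_mask[offset])
--                         offset += 1
--                     else:
--                         temp_write_values.append(0)
--                         temp_write_mask.append(False)
--                 ret[base_address].append((temp_write_values, temp_write_mask))
--                 base_address += bus_width
--     return ret
-- ===== SOURCE B (Python) =====
-- from typing import Tuple, Dict, List
--
-- def split_write_to_bus_width(values: Dict[int, List[Tuple[List[int], List[bool]]]], bus_width: int) \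
--         -> Dict[int, List[Tuple[List[int], List[bool]]]]:
--     ret: Dict[int, List[Tuple[List[int], List[bool]]]] = {}
--     for address, sequences in values.items():
--         base_address = (address // bus_width) * bus_width
--         lead = address - base_address
--         for write_values, mask in sequences:
--             # one flat, bus-aligned pair of lanes: lead zeros, the data, trailing zeros
--             vals = [0] * lead + [write_values[j] for j in range(len(mask))]
--             msks = [False] * lead + list(mask)
--             pad = -len(vals) % bus_width
--             vals += [0] * pad
--             msks += [False] * pad
--             for k in range(len(vals) // bus_width):
--                 chunk = (vals[k * bus_width:(k + 1) * bus_width],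
--                          msks[k * bus_width:(k + 1) * bus_width])
--                 ret.setdefault(base_address + k * bus_width, []).append(chunk)
--     return ret
-- ===== Notes on version B (the rewrite author's own statement) =====
-- stated objective: alternative
-- what changed: Instead of A's while-loop that rebuilds each word element-by-element with an inner range(bus_width) scan, per-element in-window tests and a running offset counter, B builds one flat zero-padded value/mask lane per write with bulk list operations and slices it into consecutive bus_width-sized chunks; Pre_ excludes bus_width <= 0 (A raises ZeroDivisionError at 0 and for negative widths either never terminates or accidentally returns an empty/partial dict) and masks longer than their value list (A raises IndexError).
-- outside the precondition, e.g. on split_write_to_bus_width({2: [([4], [False, True])]}, -18): A returns {}, B raises IndexError; on split_write_to_bus_width({2: [([4, 5], [False, True])]}, -18): A returns {}, B returns {}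
import Mathlib
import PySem

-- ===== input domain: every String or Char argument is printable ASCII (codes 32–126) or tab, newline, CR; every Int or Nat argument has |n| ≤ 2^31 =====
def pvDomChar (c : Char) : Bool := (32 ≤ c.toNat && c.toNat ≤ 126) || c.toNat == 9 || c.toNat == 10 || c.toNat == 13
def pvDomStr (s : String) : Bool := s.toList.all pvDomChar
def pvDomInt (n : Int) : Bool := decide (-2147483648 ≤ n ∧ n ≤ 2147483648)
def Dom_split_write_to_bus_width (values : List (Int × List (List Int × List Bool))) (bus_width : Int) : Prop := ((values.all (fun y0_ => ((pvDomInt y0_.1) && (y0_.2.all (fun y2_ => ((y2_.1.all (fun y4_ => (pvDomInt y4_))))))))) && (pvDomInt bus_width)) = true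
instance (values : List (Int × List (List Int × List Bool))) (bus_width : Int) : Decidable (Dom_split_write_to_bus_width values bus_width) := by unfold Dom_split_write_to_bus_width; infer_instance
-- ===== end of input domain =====

-- B replaces A's stateful while/offset word-builder by a flat pad-and-slice decomposition
-- (objective: alternative, similar asymptotic cost). Equivalence is about the return value; A mutates nothing.


-- ===== PORT A =====
-- body of A's 'for i in range(bus_width)' loop; state = (temp_write_values, temp_write_mask, offset);
-- 'base_address + i in range(address, address + len(_mask))' is the two comparisons
def splitStepA (wv : List Int) (m : List Bool) (address base_address : Int)
    (st : List Int × List Bool × Int) (i : Int) : List Int × List Bool × Int :=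
  if address ≤ base_address + i ∧ base_address + i < address + (m.length : Int) then
    (st.1 ++ [PySem.List.pyGetD wv st.2.2 0], st.2.1 ++ [PySem.List.pyGetD m st.2.2 false],
      st.2.2 + 1)
  else (st.1 ++ [(0 : Int)], st.2.1 ++ [false], st.2.2)

-- A's inner 'for i in range(bus_width)' loop ('_write_values[offset]' is exact under
-- Pre_, which gives offset < len(_write_values); outside Pre_ Python raises IndexError)
def splitInnerA (wv : List Int) (m : List Bool) (address base_address bus_width offset : Int) :
    List Int × List Bool × Int :=
  (PySem.List.pyRange 0 bus_width 1).foldl (splitStepA wv m address base_address) ([], [], offset)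

-- A's 'while base_address < address + len(_mask)' loop; the '0 < bus_width' conjunct is a
-- totality guard only: for bus_width = 0 the Python raises before the loop, for bus_width < 0
-- it never terminates — both outside Pre_.
def splitWhileA (bus_width address : Int) (wv : List Int) (m : List Bool)
    (ret : PySem.Dict Int (List (List Int × List Bool))) (base_address offset : Int) :
    PySem.Dict Int (List (List Int × List Bool)) :=
  if _h : base_address < address + (m.length : Int) ∧ 0 < bus_width then
    let ret1 := if ret.contains base_address then ret else ret.insert base_address []
    let st := splitInnerA wv m address base_address bus_width offset
    splitWhileA bus_width address wv m
      (ret1.insert base_address (ret1.getD base_address [] ++ [(st.1, st.2.1)]))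
      (base_address + bus_width) st.2.2
  else ret
termination_by (address + (m.length : Int) - base_address).toNat
decreasing_by omega

-- the Lean assoc list denotes the Python dict A receives (PySem.Dict.ofList: last duplicate
-- wins, first position kept); 'values.items()' iteration = .items
def split_write_to_bus_width (values : List (Int × List (List Int × List Bool))) (bus_width : Int) : List (Int × List (List Int × List Bool)) :=
  ((PySem.Dict.ofList values).items.foldl
    (fun ret p => p.2.foldl
      (fun ret sq => splitWhileA bus_width p.1 sq.1 sq.2 ret
        (PySem.Int.floordiv p.1 bus_width * bus_width) 0) ret)
    PySem.Dict.empty).items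

-- ===== PORT B =====
-- B's per-sequence body: build flat bus-aligned value/mask lanes, then slice them into
-- bus_width-sized chunks ('ret.setdefault(key, []).append(c)' is Dict.modify key [] (· ++ [c]))
def splitSeqB (bus_width base_address : Int) (lead : Nat)
    (ret : PySem.Dict Int (List (List Int × List Bool))) (sq : List Int × List Bool) :
    PySem.Dict Int (List (List Int × List Bool)) :=
  let vals0 := List.replicate lead (0 : Int) ++
    (PySem.List.pyRange 0 (sq.2.length : Int) 1).map (fun j => PySem.List.pyGetD sq.1 j 0)
  let msks0 := List.replicate lead false ++ sq.2
  let pad := (PySem.Int.mod (-(vals0.length : Int)) bus_width).toNat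
  let vals := vals0 ++ List.replicate pad (0 : Int)
  let msks := msks0 ++ List.replicate pad false
  (PySem.List.pyRange 0 (PySem.Int.floordiv (vals.length : Int) bus_width) 1).foldl
    (fun ret k =>
      ret.modify (base_address + k * bus_width) []
        (· ++ [(PySem.List.slice vals (some (k * bus_width)) (some ((k + 1) * bus_width)),
                PySem.List.slice msks (some (k * bus_width)) (some ((k + 1) * bus_width)))]))
    ret

def split_write_to_bus_width_alt (values : List (Int × List (List Int × List Bool))) (bus_width : Int) : List (Int × List (List Int × List Bool)) :=
  ((PySem.Dict.ofList values).items.foldl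
    (fun ret p =>
      let base_address := PySem.Int.floordiv p.1 bus_width * bus_width
      let lead := (p.1 - base_address).toNat
      p.2.foldl (splitSeqB bus_width base_address lead) ret)
    PySem.Dict.empty).items

-- ===== PRECONDITION & SPEC =====
-- Pre_ excludes bus_width ≤ 0, where A raises ZeroDivisionError (at 0) or for negative widths
-- either never terminates or accidentally returns an empty/partial dict without touching the data,
-- and any sequence whose mask is longer than its value list, where A raises IndexError.
def Pre_split_write_to_bus_width (values : List (Int × List (List Int × List Bool))) (bus_width : Int) : Prop :=
  0 < bus_width ∧
    ∀ p ∈ (PySem.Dict.ofList values).items, ∀ sq ∈ p.2, sq.2.length ≤ sq.1.length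
instance (values : List (Int × List (List Int × List Bool))) (bus_width : Int) : Decidable (Pre_split_write_to_bus_width values bus_width) := by unfold Pre_split_write_to_bus_width; infer_instance
def pvWitness_split_write_to_bus_width : (List (Int × List (List Int × List Bool))) × Int :=
  ([(5, [([1, 2, 3], [true, true, true])]), (0, [([7], [false])])], 4)

def Spec_split_write_to_bus_width (values : List (Int × List (List Int × List Bool))) (bus_width : Int) (out : List (Int × List (List Int × List Bool))) : Prop := out = split_write_to_bus_width_alt values bus_width
instance (values : List (Int × List (List Int × List Bool))) (bus_width : Int) (out : List (Int × List (List Int × List Bool))) : Decidable (Spec_split_write_to_bus_width values bus_width out) := by unfold Spec_split_write_to_bus_width; infer_instance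

-- ===== CLAIM (what is proved, stated in full; the proofs are below) =====
def Claim_equal_split_write_to_bus_width : Prop := ∀ (values : List (Int × List (List Int × List Bool))) (bus_width : Int), Dom_split_write_to_bus_width values bus_width → Pre_split_write_to_bus_width values bus_width → Spec_split_write_to_bus_width values bus_width (split_write_to_bus_width values bus_width)

-- ===== LEMMAS AND PROOFS =====

-- the value/mask lane A and B both realise at absolute position x of a write at address a
def pvVF (wv : List Int) (a L : Int) (x : Int) : Int :=
  if a ≤ x ∧ x < a + L then PySem.List.pyGetD wv (x - a) 0 else 0
def pvMF (m : List Bool) (a L : Int) (x : Int) : Bool :=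
  if a ≤ x ∧ x < a + L then PySem.List.pyGetD m (x - a) false else false

-- A's inner loop appends pvVF/pvMF of each visited position; the offset counter always
-- equals the number of in-window positions seen, i.e. clamp(pos - a) into [0, len m]
theorem stepA_spec (wv : List Int) (m : List Bool) (a base : Int) :
    ∀ (u v : Int), u ≤ v → ∀ (accv : List Int) (accm : List Bool),
    (PySem.List.pyRange u v 1).foldl (splitStepA wv m a base)
        (accv, accm, min (max (base + u - a) 0) (m.length : Int)) =
      (accv ++ (PySem.List.pyRange u v 1).map (fun i => pvVF wv a m.length (base + i)),
       accm ++ (PySem.List.pyRange u v 1).map (fun i => pvMF m a m.length (base + i)),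
       min (max (base + v - a) 0) (m.length : Int)) := by
  intro u v huv
  induction hi : (v - u).toNat generalizing u with
  | zero =>
    intro accv accm
    have hvu : v = u := by omega
    subst hvu
    rw [PySem.List.pyRange_one_eq_nil le_rfl]
    simp
  | succ k ih =>
    intro accv accm
    have hlt : u < v := by omega
    rw [PySem.List.pyRange_one_cons hlt]
    simp only [List.foldl_cons, List.map_cons]
    by_cases hc : a ≤ base + u ∧ base + u < a + (m.length : Int)
    · have h1 : min (max (base + u - a) 0) (m.length : Int) = base + u - a := by omega
      have h2 : base + u - a + 1 = min (max (base + (u + 1) - a) 0) (m.length : Int) := by omega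
      rw [splitStepA, if_pos hc]
      simp only [h1, h2]
      rw [ih (u + 1) (by omega) (by omega)]
      simp [pvVF, pvMF, hc]
    · have h2 : min (max (base + u - a) 0) (m.length : Int)
          = min (max (base + (u + 1) - a) 0) (m.length : Int) := by omega
      rw [splitStepA, if_neg hc]
      simp only []
      rw [h2, ih (u + 1) (by omega) (by omega)]
      simp [pvVF, pvMF, hc]

theorem pyRange_map_shift {α : Type} (f : Int → α) (c u v : Int) :
    (PySem.List.pyRange u v 1).map (fun i => f (c + i)) =
      (PySem.List.pyRange (c + u) (c + v) 1).map f := by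
  rw [PySem.List.pyRange_one, PySem.List.pyRange_one, List.map_map, List.map_map]
  have : (c + v - (c + u)).toNat = (v - u).toNat := by omega
  rw [this]
  apply List.map_congr_left
  intro k _
  simp [Function.comp]
  ring_nf

theorem slice_map_pyRange {α : Type} (f : Int → α) (c d u v : Int)
    (h0 : 0 ≤ u) (huv : u ≤ v) (hvd : c + v ≤ d) :
    PySem.List.slice ((PySem.List.pyRange c d 1).map f) (some u) (some v) =
      (PySem.List.pyRange (c + u) (c + v) 1).map f := by
  rw [PySem.List.slice_toNat _ h0 (by omega)]
  rw [PySem.List.pyRange_one_append c (c + u) d (by omega) (by omega),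
      PySem.List.pyRange_one_append (c + u) (c + v) d (by omega) hvd]
  rw [List.map_append, List.map_append]
  rw [List.drop_left' (by simp only [List.length_map, PySem.List.length_pyRange_one]; omega)]
  rw [List.take_left' (by simp only [List.length_map, PySem.List.length_pyRange_one]; omega)]

-- A's "ensure key, then append" dict update is B's setdefault-append, i.e. Dict.modify
theorem dict_append_eq_modify (d : PySem.Dict Int (List (List Int × List Bool))) (b : Int)
    (c : List Int × List Bool) :
    ((if d.contains b then d else d.insert b []).insert b
      ((if d.contains b then d else d.insert b []).getD b [] ++ [c])) =
      d.modify b [] (· ++ [c]) := by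
  by_cases h : d.contains b <;>
    simp [h, PySem.Dict.modify, PySem.Dict.getD_of_not_contains,
      PySem.Dict.insert_insert_self, PySem.Dict.getD_eq_get?_getD]

-- A's while loop, started at the j-th word boundary, is B's fold over the remaining chunks
theorem whileA_eq (bw a : Int) (wv : List Int) (m : List Bool)
    (base0 lead pad n : Int) (hbw : 0 < bw)
    (hlead : base0 + lead = a)
    (hn : n * bw = lead + (m.length : Int) + pad) (hp0 : 0 ≤ pad) (hpb : pad < bw)
    (V : List Int) (M : List Bool)
    (hV : V = (PySem.List.pyRange base0 (base0 + n * bw) 1).map (pvVF wv a m.length))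
    (hM : M = (PySem.List.pyRange base0 (base0 + n * bw) 1).map (pvMF m a m.length)) :
    ∀ (j : Int), 0 ≤ j → ∀ ret,
    splitWhileA bw a wv m ret (base0 + j * bw)
        (min (max (base0 + j * bw - a) 0) (m.length : Int)) =
      (PySem.List.pyRange j n 1).foldl
        (fun ret k =>
          ret.modify (base0 + k * bw) []
            (· ++ [(PySem.List.slice V (some (k * bw)) (some ((k + 1) * bw)),
                    PySem.List.slice M (some (k * bw)) (some ((k + 1) * bw)))]))
        ret := by
  intro j hj
  induction hk : (n - j).toNat generalizing j with
  | zero =>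
    intro ret
    have hnj : n ≤ j := by omega
    have hmul : n * bw ≤ j * bw := mul_le_mul_of_nonneg_right hnj (le_of_lt hbw)
    have hstop : ¬ (base0 + j * bw < a + (m.length : Int) ∧ 0 < bw) := by
      intro ⟨h1, _⟩; omega
    rw [splitWhileA, dif_neg hstop, PySem.List.pyRange_one_eq_nil hnj, List.foldl_nil]
  | succ k ih =>
    intro ret
    have hjn : j < n := by omega
    have hexp : (j + 1) * bw = j * bw + bw := by ring
    have hmul : (j + 1) * bw ≤ n * bw := mul_le_mul_of_nonneg_right (by omega) (le_of_lt hbw)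
    have hrun : base0 + j * bw < a + (m.length : Int) ∧ 0 < bw := ⟨by omega, hbw⟩
    rw [splitWhileA, dif_pos hrun]
    have hinner : splitInnerA wv m a (base0 + j * bw) bw
        (min (max (base0 + j * bw - a) 0) (m.length : Int)) =
        ((PySem.List.pyRange (base0 + j * bw) (base0 + j * bw + bw) 1).map (pvVF wv a m.length),
         (PySem.List.pyRange (base0 + j * bw) (base0 + j * bw + bw) 1).map (pvMF m a m.length),
         min (max (base0 + j * bw + bw - a) 0) (m.length : Int)) := by
      unfold splitInnerA
      have hs := stepA_spec wv m a (base0 + j * bw) 0 bw (le_of_lt hbw) [] []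
      simp only [add_zero] at hs
      rw [hs, pyRange_map_shift (pvVF wv a m.length) (base0 + j * bw) 0 bw,
          pyRange_map_shift (pvMF m a m.length) (base0 + j * bw) 0 bw]
      simp only [add_zero, List.nil_append]
    have harg : base0 + j * bw + bw = base0 + (j + 1) * bw := by omega
    rw [harg] at hinner
    have hsliceV : PySem.List.slice V (some (j * bw)) (some ((j + 1) * bw)) =
        (PySem.List.pyRange (base0 + j * bw) (base0 + (j + 1) * bw) 1).map (pvVF wv a m.length) := by
      rw [hV, slice_map_pyRange _ base0 _ _ _ (mul_nonneg hj (le_of_lt hbw))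
        (by omega) (by omega)]
    have hsliceM : PySem.List.slice M (some (j * bw)) (some ((j + 1) * bw)) =
        (PySem.List.pyRange (base0 + j * bw) (base0 + (j + 1) * bw) 1).map (pvMF m a m.length) := by
      rw [hM, slice_map_pyRange _ base0 _ _ _ (mul_nonneg hj (le_of_lt hbw))
        (by omega) (by omega)]
    rw [PySem.List.pyRange_one_cons hjn, List.foldl_cons]
    simp only [hinner, harg]
    rw [ih (j + 1) (by omega) (by omega)]
    congr 1
    rw [← hsliceV, ← hsliceM]
    exact dict_append_eq_modify ret (base0 + j * bw) _

theorem map_const_range {α : Type} (f : Int → α) (z : α) (c d : Int)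
    (h : ∀ x, c ≤ x → x < d → f x = z) :
    (PySem.List.pyRange c d 1).map f = List.replicate (d - c).toNat z := by
  rw [List.eq_replicate_iff]
  constructor
  · simp [PySem.List.length_pyRange_one]
  · intro b hb
    obtain ⟨x, hx, rfl⟩ := List.mem_map.mp hb
    obtain ⟨h1, h2⟩ := (PySem.List.mem_pyRange_one).mp hx
    exact h x h1 h2

-- B's flat lanes are the pvVF/pvMF picture of the whole aligned window
theorem lane_decomp (wv : List Int) (m : List Bool) (a base0 lead pad n bw : Int)
    (hlead : base0 + lead = a) (h0 : 0 ≤ lead)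
    (hn : n * bw = lead + (m.length : Int) + pad) (hp0 : 0 ≤ pad) :
    List.replicate lead.toNat (0 : Int) ++
        (PySem.List.pyRange 0 (m.length : Int) 1).map (fun j => PySem.List.pyGetD wv j 0) ++
        List.replicate pad.toNat (0 : Int) =
      (PySem.List.pyRange base0 (base0 + n * bw) 1).map (pvVF wv a m.length) ∧
    List.replicate lead.toNat false ++ m ++ List.replicate pad.toNat false =
      (PySem.List.pyRange base0 (base0 + n * bw) 1).map (pvMF m a m.length) := by
  have hL : (0 : Int) ≤ (m.length : Int) := by positivity
  rw [PySem.List.pyRange_one_append base0 (a + (m.length : Int)) (base0 + n * bw)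
      (by omega) (by omega),
      PySem.List.pyRange_one_append base0 a (a + (m.length : Int)) (by omega) (by omega),
      List.map_append, List.map_append, List.map_append, List.map_append]
  have hr1v : (PySem.List.pyRange base0 a 1).map (pvVF wv a (m.length : Int)) =
      List.replicate lead.toNat (0 : Int) := by
    rw [map_const_range _ _ _ _ (fun x h1 h2 => by simp only [pvVF]; rw [if_neg (by omega)])]
    congr 1; omega
  have hr1m : (PySem.List.pyRange base0 a 1).map (pvMF m a (m.length : Int)) =
      List.replicate lead.toNat false := by
    rw [map_const_range _ _ _ _ (fun x h1 h2 => by simp only [pvMF]; rw [if_neg (by omega)])]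
    congr 1; omega
  have hr3v : (PySem.List.pyRange (a + (m.length : Int)) (base0 + n * bw) 1).map
      (pvVF wv a (m.length : Int)) = List.replicate pad.toNat (0 : Int) := by
    rw [map_const_range _ _ _ _ (fun x h1 h2 => by simp only [pvVF]; rw [if_neg (by omega)])]
    congr 1; omega
  have hr3m : (PySem.List.pyRange (a + (m.length : Int)) (base0 + n * bw) 1).map
      (pvMF m a (m.length : Int)) = List.replicate pad.toNat false := by
    rw [map_const_range _ _ _ _ (fun x h1 h2 => by simp only [pvMF]; rw [if_neg (by omega)])]
    congr 1; omega
  have hr2v : (PySem.List.pyRange a (a + (m.length : Int)) 1).map (pvVF wv a (m.length : Int)) =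
      (PySem.List.pyRange 0 (m.length : Int) 1).map (fun j => PySem.List.pyGetD wv j 0) := by
    have hsh := pyRange_map_shift (pvVF wv a (m.length : Int)) a 0 (m.length : Int)
    rw [add_zero] at hsh
    rw [← hsh]
    apply List.map_congr_left
    intro j hj
    obtain ⟨h1, h2⟩ := (PySem.List.mem_pyRange_one).mp hj
    simp only [pvVF]
    rw [if_pos (by omega)]
    congr 1; omega
  have hr2m : (PySem.List.pyRange a (a + (m.length : Int)) 1).map (pvMF m a (m.length : Int)) =
      m := by
    have hsh := pyRange_map_shift (pvMF m a (m.length : Int)) a 0 (m.length : Int)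
    rw [add_zero] at hsh
    rw [← hsh]
    have hid : (PySem.List.pyRange 0 (m.length : Int) 1).map
        (fun j => pvMF m a (m.length : Int) (a + j)) =
        (PySem.List.pyRange 0 (PySem.List.len m) 1).map
          (fun j => PySem.List.pyGetD m j false) := by
      apply List.map_congr_left
      intro j hj
      obtain ⟨h1, h2⟩ := (PySem.List.mem_pyRange_one).mp hj
      simp only [pvMF] at *
      rw [if_pos (by omega)]
      congr 1; omega
    rw [hid, PySem.List.map_pyGetD_pyRange_zero]
  exact ⟨by rw [hr1v, hr2v, hr3v], by rw [hr1m, hr2m, hr3m]⟩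

-- one masked write: A's whole while loop equals B's whole per-sequence body
theorem seq_eq (bw a : Int) (hbw : 0 < bw) (ret : PySem.Dict Int (List (List Int × List Bool)))
    (sq : List Int × List Bool) :
    splitWhileA bw a sq.1 sq.2 ret (PySem.Int.floordiv a bw * bw) 0 =
      splitSeqB bw (PySem.Int.floordiv a bw * bw)
        ((a - PySem.Int.floordiv a bw * bw).toNat) ret sq := by
  set base0 := PySem.Int.floordiv a bw * bw with hbase0
  set lead := PySem.Int.mod a bw with hleaddef
  have hlead : base0 + lead = a := PySem.Int.floordiv_mul_add_mod a bw
  have h0 : 0 ≤ lead := PySem.Int.mod_nonneg a hbw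
  have hlt : lead < bw := PySem.Int.mod_lt a hbw
  set L : Int := (sq.2.length : Int) with hLdef
  set pad := PySem.Int.mod (-(lead + L)) bw with hpaddef
  have hp0 : 0 ≤ pad := PySem.Int.mod_nonneg _ hbw
  have hpb : pad < bw := PySem.Int.mod_lt _ hbw
  set n := -(PySem.Int.floordiv (-(lead + L)) bw) with hndef
  have hq := PySem.Int.floordiv_mul_add_mod (-(lead + L)) bw
  have hn : n * bw = lead + L + pad := by
    have hneg : -(PySem.Int.floordiv (-(lead + L)) bw) * bw
        = -(PySem.Int.floordiv (-(lead + L)) bw * bw) := by ring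
    rw [hndef, hneg]
    omega
  obtain ⟨hVd, hMd⟩ := lane_decomp sq.1 sq.2 a base0 lead pad n bw hlead h0 hn hp0
  rw [splitSeqB]
  have hleadN : (a - base0).toNat = lead.toNat := by omega
  simp only [hleadN]
  have hlen0 : ((List.replicate lead.toNat (0 : Int) ++
      (PySem.List.pyRange 0 (sq.2.length : Int) 1).map
        (fun j => PySem.List.pyGetD sq.1 j 0)).length : Int) = lead + L := by
    simp [PySem.List.length_pyRange_one]
    omega
  rw [hlen0]
  have hpadN : (PySem.Int.mod (-(lead + L)) bw).toNat = pad.toNat := by rw [hpaddef]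
  rw [hpadN]
  have hlen1 : (((List.replicate lead.toNat (0 : Int) ++
      (PySem.List.pyRange 0 (sq.2.length : Int) 1).map
        (fun j => PySem.List.pyGetD sq.1 j 0)) ++
      List.replicate pad.toNat (0 : Int)).length : Int) = n * bw := by
    simp [PySem.List.length_pyRange_one]
    omega
  rw [hlen1]
  have hdiv : PySem.Int.floordiv (n * bw) bw = n := by
    rw [PySem.Int.floordiv_eq_iff_of_pos hbw]
    refine ⟨le_rfl, ?_⟩
    have hexp : (n + 1) * bw = n * bw + bw := by ring
    omega
  rw [hdiv]
  rw [hVd, hMd]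
  have h00 : base0 + 0 * bw = base0 := by ring
  have hoff : min (max (base0 - a) 0) (sq.2.length : Int) = 0 := by omega
  have hw := whileA_eq bw a sq.1 sq.2 base0 lead pad n hbw hlead hn hp0 hpb
    _ _ rfl rfl 0 le_rfl ret
  rw [h00, hoff] at hw
  exact hw

-- ===== VERDICT (by name: the statement is the Claim_ definition above) =====
theorem split_write_to_bus_width_spec : Claim_equal_split_write_to_bus_width := by
  intro values bw _ hpre
  unfold Spec_split_write_to_bus_width split_write_to_bus_width split_write_to_bus_width_alt
  obtain ⟨hbw, -⟩ := hpre
  congr 1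
  apply List.foldl_ext
  intro ret p _
  apply List.foldl_ext
  intro ret' sq _
  exact seq_eq bw p.1 hbw ret' sq
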